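-- pv_equiv track=rewrite | github.com/olteffe/stepik | 2.6.4.py | sum_matrix_elements
-- ===== SOURCE A (Python) =====
-- def sum_matrix_elements(input_matrix: list) -> list:
--     height = len(input_matrix)
--     length = len(input_matrix[0])
--     output_matrix = [[0 for j in range(length)] for i in range(height)]
--     for i in range(height):
--         for j in range(length):
--             output_matrix[i][j] = sum((
--                 input_matrix[(i + 1) % height][j],
--                 input_matrix[(i - 1) % height][j],
--                 input_matrix[i][(j + 1) % length],
--                 input_matrix[i][(j - 1) % length]
--             ))
--     return output_matrix
-- ===== SOURCE B (Python) =====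
-- def sum_matrix_elements(input_matrix: list) -> list:
--     length = len(input_matrix[0])
--     rows = [row[:length] for row in input_matrix]
--     up = rows[1:] + rows[:1]
--     down = rows[-1:] + rows[:-1]
--     output_matrix = []
--     for ru, rd, row in zip(up, down, rows):
--         right = row[1:] + row[:1]
--         left = row[-1:] + row[:-1]
--         output_matrix.append([a + b + c + d for a, b, c, d in zip(ru, rd, right, left)])
--     return output_matrix
-- ===== Notes on version B (the rewrite author's own statement) =====
-- stated objective: faster
-- what changed: Replaces per-cell modular-index gathering (nested loops with four %-indexed lookups per cell) by zipping the matrix with its four cyclic rotations (rows rotated up/down, each row rotated left/right) and summing component-wise; bulk slicing/zip removes per-cell index and modulo work.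
import Mathlib
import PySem

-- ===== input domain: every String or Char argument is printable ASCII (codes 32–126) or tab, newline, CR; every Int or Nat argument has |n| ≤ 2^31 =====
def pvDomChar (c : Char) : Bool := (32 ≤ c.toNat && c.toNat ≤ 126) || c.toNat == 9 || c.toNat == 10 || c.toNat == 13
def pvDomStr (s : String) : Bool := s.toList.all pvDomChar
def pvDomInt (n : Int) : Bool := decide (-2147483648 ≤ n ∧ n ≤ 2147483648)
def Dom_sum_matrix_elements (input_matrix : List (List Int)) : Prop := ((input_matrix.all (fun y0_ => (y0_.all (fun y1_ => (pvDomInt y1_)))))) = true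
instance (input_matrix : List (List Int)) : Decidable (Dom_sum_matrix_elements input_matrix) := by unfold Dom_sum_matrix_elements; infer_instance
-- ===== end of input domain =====

-- B replaces per-cell index/modulo gathering by zipping the matrix with its four cyclic
-- rotations (rows rotated up/down, each row rotated left/right): same values, different decomposition.

-- ===== PORT A =====
-- output_matrix is initialised to zeros and every cell assigned exactly once, in order;
-- ported as the nested comprehension computing each cell (same cells, same order).
def sum_matrix_elements (input_matrix : List (List Int)) : List (List Int) :=
  let height := input_matrix.length
  let length := ((PySem.List.pyGet? input_matrix 0).getD []).length
  (List.range height).map (fun (i : Nat) =>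
    (List.range length).map (fun (j : Nat) =>
      ((PySem.List.pyGet? ((PySem.List.pyGet? input_matrix (PySem.Int.mod ((i:Int)+1) (height:Int))).getD []) (j:Int)).getD 0
      + (PySem.List.pyGet? ((PySem.List.pyGet? input_matrix (PySem.Int.mod ((i:Int)-1) (height:Int))).getD []) (j:Int)).getD 0)
      + (PySem.List.pyGet? ((PySem.List.pyGet? input_matrix (i:Int)).getD []) (PySem.Int.mod ((j:Int)+1) (length:Int))).getD 0
      + (PySem.List.pyGet? ((PySem.List.pyGet? input_matrix (i:Int)).getD []) (PySem.Int.mod ((j:Int)-1) (length:Int))).getD 0))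

-- ===== PORT B =====
def sum_matrix_elements_alt (input_matrix : List (List Int)) : List (List Int) :=
  let length := ((PySem.List.pyGet? input_matrix 0).getD []).length
  let rows := input_matrix.map (fun row => PySem.List.slice row none (some (length:Int)))
  let up := PySem.List.slice rows (some 1) none ++ PySem.List.slice rows none (some 1)
  let down := PySem.List.slice rows (some (-1)) none ++ PySem.List.slice rows none (some (-1))
  (up.zip (down.zip rows)).map (fun p =>
    let ru := p.1; let rd := p.2.1; let row := p.2.2
    let right := PySem.List.slice row (some 1) none ++ PySem.List.slice row none (some 1)
    let left := PySem.List.slice row (some (-1)) none ++ PySem.List.slice row none (some (-1))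
    (ru.zip (rd.zip (right.zip left))).map (fun q => q.1 + q.2.1 + q.2.2.1 + q.2.2.2))

-- ===== PRECONDITION & SPEC =====
-- Pre_ is exactly A's return domain: A raises IndexError on the empty matrix (input_matrix[0])
-- and whenever some row is shorter than row 0 (input_matrix[x][j] with j < len(row 0)).
def Pre_sum_matrix_elements (input_matrix : List (List Int)) : Prop :=
  input_matrix ≠ [] ∧ ∀ row ∈ input_matrix, (input_matrix.headD []).length ≤ row.length
instance (input_matrix : List (List Int)) : Decidable (Pre_sum_matrix_elements input_matrix) := by unfold Pre_sum_matrix_elements; infer_instance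
def pvWitness_sum_matrix_elements : List (List Int) := [[1, 2], [3, 4]]
def Spec_sum_matrix_elements (input_matrix : List (List Int)) (out : List (List Int)) : Prop := out = sum_matrix_elements_alt input_matrix
instance (input_matrix : List (List Int)) (out : List (List Int)) : Decidable (Spec_sum_matrix_elements input_matrix out) := by unfold Spec_sum_matrix_elements; infer_instance

-- ===== CLAIM (what is proved, stated in full; the proofs are below) =====
def Claim_equal_sum_matrix_elements : Prop := ∀ (input_matrix : List (List Int)), Dom_sum_matrix_elements input_matrix → Pre_sum_matrix_elements input_matrix → Spec_sum_matrix_elements input_matrix (sum_matrix_elements input_matrix)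

-- ===== LEMMAS AND PROOFS =====


-- helper: Python-style defaulted double lookup m[r][c] (0 when out of range), Nat indices
def pvGd (m : List (List Int)) (r c : Nat) : Int := (((m[r]?).getD [])[c]?).getD 0

-- the common "gather" normal form both ports are reduced to
def pvGather (m : List (List Int)) (l : Nat) : List (List Int) :=
  (List.range m.length).map (fun i =>
    (List.range l).map (fun j =>
      pvGd m ((i+1) % m.length) j + pvGd m ((i + m.length - 1) % m.length) j
      + pvGd m i ((j+1) % l) + pvGd m i ((j + l - 1) % l)))

def pvRotL {α : Type} (xs : List α) : List α := xs.drop 1 ++ xs.take 1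
def pvRotR {α : Type} (xs : List α) : List α := xs.drop (xs.length - 1) ++ xs.take (xs.length - 1)

theorem pvRotL_length {α : Type} (xs : List α) : (pvRotL xs).length = xs.length := by
  simp [pvRotL]; omega

theorem pvRotR_length {α : Type} (xs : List α) : (pvRotR xs).length = xs.length := by
  simp [pvRotR]

theorem pvRotL_getElem? {α : Type} (xs : List α) (i : Nat) (hi : i < xs.length) :
    (pvRotL xs)[i]? = xs[(i+1) % xs.length]? := by
  unfold pvRotL
  rcases Nat.lt_or_ge i (xs.length - 1) with h | h
  · rw [List.getElem?_append_left (by simp; try omega), List.getElem?_drop,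
      Nat.mod_eq_of_lt (by omega), Nat.add_comm 1 i]
  · have hi0 : i = xs.length - 1 := by omega
    subst hi0
    rw [List.getElem?_append_right (by simp; try omega)]
    have h1 : (xs.length - 1 + 1) % xs.length = 0 := by
      rw [Nat.sub_add_cancel (by omega), Nat.mod_self]
    have h3 : xs.length - 1 - (xs.drop 1).length = 0 := by simp
    rw [h1, h3, List.getElem?_take, if_pos (by omega)]

theorem pvRotR_getElem? {α : Type} (xs : List α) (i : Nat) (hi : i < xs.length) :
    (pvRotR xs)[i]? = xs[(i + xs.length - 1) % xs.length]? := by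
  unfold pvRotR
  rcases Nat.eq_zero_or_pos i with h | h
  · subst h
    have h1 : (0 + xs.length - 1) % xs.length = xs.length - 1 := by
      rw [Nat.zero_add]; exact Nat.mod_eq_of_lt (by omega)
    rw [h1, List.getElem?_append_left (by simp; try omega), List.getElem?_drop]
    simp
  · have h1 : (i + xs.length - 1) % xs.length = i - 1 := by
      have h2 : i + xs.length - 1 = (i - 1) + xs.length := by omega
      rw [h2, Nat.add_mod_right]
      exact Nat.mod_eq_of_lt (by omega)
    rw [h1, List.getElem?_append_right (by simp; try omega)]
    have h3 : i - (xs.drop (xs.length - 1)).length = i - 1 := by simp; omega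
    rw [h3, List.getElem?_take, if_pos (by omega)]

theorem pvGd_eq_getElem {L : List (List Int)} {r c : Nat} (hr : r < L.length)
    (hc : c < (L[r]'hr).length) : pvGd L r c = (L[r]'hr)[c]'hc := by
  simp [pvGd, List.getElem?_eq_getElem hr, List.getElem?_eq_getElem hc]

theorem pvGd_trim (m : List (List Int)) (l r c : Nat) (hc : c < l) :
    pvGd (m.map (List.take l)) r c = pvGd m r c := by
  simp only [pvGd, List.getElem?_map]
  cases m[r]? <;> simp [hc]

theorem pvGather_trim (m : List (List Int)) (l : Nat) :
    pvGather (m.map (List.take l)) l = pvGather m l := by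
  unfold pvGather
  simp only [List.length_map]
  apply List.map_congr_left; intro i _
  apply List.map_congr_left; intro j hj
  rw [List.mem_range] at hj
  have h1 : (j+1) % l < l := Nat.mod_lt _ (by omega)
  have h2 : (j + l - 1) % l < l := Nat.mod_lt _ (by omega)
  rw [pvGd_trim _ _ _ _ hj, pvGd_trim _ _ _ _ hj, pvGd_trim _ _ _ _ h1, pvGd_trim _ _ _ _ h2]

theorem pvMod_succ (i n : Nat) : PySem.Int.mod ((i:Int)+1) (n:Int) = (((i+1) % n : Nat) : Int) := by
  have h : ((i:Int)+1) = ((i+1 : Nat) : Int) := by push_cast; ring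
  rw [h, PySem.Int.mod_natCast]

theorem pvMod_pred (i n : Nat) (hi : i < n) :
    PySem.Int.mod ((i:Int)-1) (n:Int) = (((i + n - 1) % n : Nat) : Int) := by
  rw [PySem.Int.mod_eq_emod_of_pos (by omega)]
  have h1 : ((i:Int) - 1) = ((i + n - 1 : Nat) : Int) - (n:Int) := by omega
  rw [h1, Int.sub_emod_right, Int.natCast_mod]

-- Port A reduces to the gather normal form
theorem pvA_eq (m : List (List Int)) (hm : m ≠ []) :
    sum_matrix_elements m = pvGather m ((m.headD []).length) := by
  have hh : 0 < m.length := List.length_pos_iff.mpr hm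
  unfold sum_matrix_elements pvGather
  dsimp only
  have h0 : (PySem.List.pyGet? m 0).getD [] = m.headD [] := by
    rw [PySem.List.pyGet?_zero]; cases m <;> rfl
  rw [h0]
  apply List.map_congr_left; intro i hi
  rw [List.mem_range] at hi
  apply List.map_congr_left; intro j hj
  rw [List.mem_range] at hj
  rw [pvMod_succ i m.length, pvMod_pred i m.length hi,
      pvMod_succ j ((m.headD []).length), pvMod_pred j ((m.headD []).length) hj]
  simp only [PySem.List.pyGet?_natCast]
  rfl

-- Port B reduces to zipped rotations of the trimmed matrix
theorem pvB_eq (m : List (List Int)) :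
    sum_matrix_elements_alt m =
      ((pvRotL (m.map (List.take ((m.headD []).length)))).zip
        ((pvRotR (m.map (List.take ((m.headD []).length)))).zip
          (m.map (List.take ((m.headD []).length))))).map (fun p =>
        ((p.1.zip (p.2.1.zip ((pvRotL p.2.2).zip (pvRotR p.2.2)))).map
          (fun q => q.1 + q.2.1 + q.2.2.1 + q.2.2.2))) := by
  have h0 : (PySem.List.pyGet? m 0).getD [] = m.headD [] := by
    rw [PySem.List.pyGet?_zero]; cases m <;> rfl
  unfold sum_matrix_elements_alt
  dsimp only
  rw [h0]
  simp [pysem, PySem.List.slice_to_natCast, PySem.List.slice_from_one,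
    PySem.List.slice_from_neg_one, PySem.List.slice_to_neg_one,
    List.dropLast_eq_take, pvRotL, pvRotR, List.drop_one]

-- the combinatorial core: zipped rotations of a rectangular matrix equal the gather form
theorem pvZip_eq_gather (L : List (List Int)) (l : Nat) (hL : L ≠ [])
    (hrow : ∀ r ∈ L, r.length = l) :
    ((pvRotL L).zip ((pvRotR L).zip L)).map (fun p =>
      ((p.1.zip (p.2.1.zip ((pvRotL p.2.2).zip (pvRotR p.2.2)))).map
        (fun q => q.1 + q.2.1 + q.2.2.1 + q.2.2.2))) = pvGather L l := by
  have hh : 0 < L.length := List.length_pos_iff.mpr hL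
  have hlen : ∀ (r : Nat) (hr : r < L.length), (L[r]'hr).length = l := by
    intro r hr; exact hrow _ (List.getElem_mem hr)
  apply List.ext_getElem
  · simp [pvGather, pvRotL_length, pvRotR_length]
  · intro i hi1 hi2
    have hi : i < L.length := by
      simp [pvRotL_length, pvRotR_length] at hi1; omega
    have hmi1 : (i+1) % L.length < L.length := Nat.mod_lt _ hh
    have hmi2 : (i + L.length - 1) % L.length < L.length := Nat.mod_lt _ hh
    simp only [List.getElem_map, List.getElem_zip, pvGather, List.getElem_range]
    have hup : (pvRotL L)[i]'(by rw [pvRotL_length]; exact hi) = L[(i+1) % L.length]'hmi1 := by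
      have := pvRotL_getElem? L i hi
      rwa [List.getElem?_eq_getElem, List.getElem?_eq_getElem, Option.some_inj] at this
    have hdn : (pvRotR L)[i]'(by rw [pvRotR_length]; exact hi) = L[(i + L.length - 1) % L.length]'hmi2 := by
      have := pvRotR_getElem? L i hi
      rwa [List.getElem?_eq_getElem, List.getElem?_eq_getElem, Option.some_inj] at this
    rw [hup, hdn]
    apply List.ext_getElem
    · simp [pvRotL_length, pvRotR_length, hlen]
    · intro j hj1 hj2
      have hj : j < l := by simpa using hj2
      have hmj1 : (j+1) % l < l := Nat.mod_lt _ (by omega)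
      have hmj2 : (j + l - 1) % l < l := Nat.mod_lt _ (by omega)
      simp only [List.getElem_map, List.getElem_zip, List.getElem_range]
      have hlrow : (L[i]'hi).length = l := hlen i hi
      have hr1 : (pvRotL (L[i]'hi))[j]'(by rw [pvRotL_length, hlrow]; exact hj)
          = (L[i]'hi)[(j+1) % l]'(by rw [hlrow]; exact hmj1) := by
        have := pvRotL_getElem? (L[i]'hi) j (by rw [hlrow]; exact hj)
        rw [hlrow] at this
        rwa [List.getElem?_eq_getElem, List.getElem?_eq_getElem, Option.some_inj] at this
      have hr2 : (pvRotR (L[i]'hi))[j]'(by rw [pvRotR_length, hlrow]; exact hj)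
          = (L[i]'hi)[(j + l - 1) % l]'(by rw [hlrow]; exact hmj2) := by
        have := pvRotR_getElem? (L[i]'hi) j (by rw [hlrow]; exact hj)
        rw [hlrow] at this
        rwa [List.getElem?_eq_getElem, List.getElem?_eq_getElem, Option.some_inj] at this
      rw [hr1, hr2,
        pvGd_eq_getElem hmi1 (by rw [hlen _ hmi1]; exact hj),
        pvGd_eq_getElem hmi2 (by rw [hlen _ hmi2]; exact hj),
        pvGd_eq_getElem hi (by rw [hlrow]; exact hmj1),
        pvGd_eq_getElem hi (by rw [hlrow]; exact hmj2)]

-- ===== VERDICT (by name: the statement is the Claim_ definition above) =====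
theorem sum_matrix_elements_spec : Claim_equal_sum_matrix_elements := by
  intro m _ hpre
  obtain ⟨hm, hrows⟩ := hpre
  unfold Spec_sum_matrix_elements
  rw [pvA_eq m hm, pvB_eq m]
  have hLne : m.map (List.take ((m.headD []).length)) ≠ [] := by
    simpa using hm
  rw [pvZip_eq_gather _ ((m.headD []).length) hLne (by
    intro r hr
    rw [List.mem_map] at hr
    obtain ⟨row, hrow, rfl⟩ := hr
    rw [List.length_take]
    exact min_eq_left (hrows row hrow))]
  rw [pvGather_trim]
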